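-- pv_equiv track=rewrite | github.com/anonymous-ismir/ismir-research-paper | backgroundMellow/backend/Evaluation/visualize_results.py | _ordered_experiment_tags
-- ===== SOURCE A (Python) =====
-- from typing import Any, Dict, Iterable, List, Literal, Mapping, Optional, Sequence, Tuple
--
-- def _ordered_experiment_tags(tags: Iterable[str]) -> List[str]:
--     seen = set()
--     ordered: List[str] = []
--     for t in tags:
--         if t and t not in seen:
--             seen.add(t)
--             ordered.append(t)
--
--     def sort_key(t: str) -> Tuple[int, str]:
--         if t == "baseline":
--             return (0, t)
--         if t.startswith("decide_model_"):
--             return (1, t)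
--         if t.startswith("toggle_"):
--             return (2, t)
--         if t == "tango2":
--             return (4, "1")
--         if t == "AudioLDM2":
--             return (4, "0")
--         return (3, t)
--
--     return sorted(ordered, key=sort_key)
-- ===== SOURCE B (Python) =====
-- from typing import Iterable, List
--
-- def _ordered_experiment_tags(tags: Iterable[str]) -> List[str]:
--     unique = list(dict.fromkeys(t for t in tags if t))
--
--     def group(t: str) -> int:
--         if t == "baseline":
--             return 0
--         if t.startswith("decide_model_"):
--             return 1
--         if t.startswith("toggle_"):
--             return 2
--         if t in ("AudioLDM2", "tango2"):
--             return 4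
--         return 3
--
--     out: List[str] = []
--     for g in (0, 1, 2, 3):
--         out += sorted(t for t in unique if group(t) == g)
--     out += [t for t in ("AudioLDM2", "tango2") if t in unique]
--     return out
-- ===== Notes on version B (the rewrite author's own statement) =====
-- stated objective: alternative
-- what changed: Instead of one stable sort under a (priority, tiebreak) tuple key, B dedupes the truthy tags, classifies each tag into one of five priority buckets, sorts each ordinary bucket by the string itself, emits the special AudioLDM2/tango2 pair in fixed order, and concatenates the buckets.
import Mathlib
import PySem

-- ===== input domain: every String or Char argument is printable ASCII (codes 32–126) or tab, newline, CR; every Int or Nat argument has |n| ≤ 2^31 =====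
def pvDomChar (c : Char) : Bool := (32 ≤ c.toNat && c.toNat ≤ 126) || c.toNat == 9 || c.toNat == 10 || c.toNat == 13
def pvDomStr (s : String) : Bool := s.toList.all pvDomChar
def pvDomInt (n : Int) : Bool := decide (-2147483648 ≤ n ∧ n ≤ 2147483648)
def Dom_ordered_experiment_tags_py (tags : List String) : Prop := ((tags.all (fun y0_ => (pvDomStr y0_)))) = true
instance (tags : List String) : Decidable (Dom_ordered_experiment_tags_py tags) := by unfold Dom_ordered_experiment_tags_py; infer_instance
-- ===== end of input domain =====

-- B replaces A's single stable sort under a (priority, tiebreak) tuple key by bucket classification: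
-- dedupe the truthy tags, sort each ordinary priority bucket by the string itself, append the
-- AudioLDM2/tango2 pair in fixed order, and concatenate the buckets (objective: alternative).

-- ===== PORT A =====
-- A's inner sort_key closure: the (int, str) tuple, branch for branch.
def keyA (t : String) : Int × String :=
  if t = "baseline" then (0, t)
  else if PySem.Str.startswith t "decide_model_" then (1, t)
  else if PySem.Str.startswith t "toggle_" then (2, t)
  else if t = "tango2" then (4, "1")
  else if t = "AudioLDM2" then (4, "0")
  else (3, t)

def ordered_experiment_tags_py (tags : List String) : List String :=
  -- the dedup loop, state (seen, ordered)
  let st := tags.foldl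
    (fun st t =>
      if t ≠ "" ∧ ¬ (PySem.Set.contains st.1 t = true) then (PySem.Set.add st.1 t, st.2 ++ [t])
      else st)
    ((PySem.Set.empty : PySem.Set String), ([] : List String))
  PySem.List.sorted2 st.2 (fun t => (keyA t).1) (fun t => (keyA t).2)

-- ===== PORT B =====
-- B's group(t): the same five priorities, the special pair recognised as one branch.
def grpB (t : String) : Int :=
  if t = "baseline" then 0
  else if PySem.Str.startswith t "decide_model_" then 1
  else if PySem.Str.startswith t "toggle_" then 2
  else if t = "AudioLDM2" ∨ t = "tango2" then 4
  else 3

def ordered_experiment_tags_py_alt (tags : List String) : List String :=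
  let unique := PySem.List.dedup (tags.filter (fun t => t ≠ ""))
  let out := ([0, 1, 2, 3] : List Int).foldl
    (fun acc g => acc ++ PySem.List.sorted (unique.filter (fun t => grpB t = g)) (fun x => x)) []
  out ++ (["AudioLDM2", "tango2"].filter (fun t => decide (t ∈ unique)))

-- ===== PRECONDITION & SPEC =====
def Spec_ordered_experiment_tags_py (tags : List String) (out : List String) : Prop := out = ordered_experiment_tags_py_alt tags
instance (tags : List String) (out : List String) : Decidable (Spec_ordered_experiment_tags_py tags out) := by unfold Spec_ordered_experiment_tags_py; infer_instance

-- ===== CLAIM (what is proved, stated in full; the proofs are below) =====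
def Claim_equal_ordered_experiment_tags_py : Prop := ∀ (tags : List String), Dom_ordered_experiment_tags_py tags → Spec_ordered_experiment_tags_py tags (ordered_experiment_tags_py tags)

-- ===== LEMMAS AND PROOFS =====

lemma grpB_eq (t : String) : grpB t = (keyA t).1 := by
  unfold grpB keyA; split_ifs <;> simp_all

lemma keyA1_mem (t : String) :
    (keyA t).1 = 0 ∨ (keyA t).1 = 1 ∨ (keyA t).1 = 2 ∨ (keyA t).1 = 3 ∨ (keyA t).1 = 4 := by
  unfold keyA; split_ifs <;> simp

lemma keyA1_four_iff (t : String) : (keyA t).1 = 4 ↔ t = "tango2" ∨ t = "AudioLDM2" := by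
  unfold keyA
  split_ifs <;> simp_all <;> refine ⟨?_, ?_⟩ <;> rintro rfl <;> exact absurd ‹_› (by decide)

lemma keyA2_eq_self (t : String) (h : (keyA t).1 ≠ 4) : (keyA t).2 = t := by
  unfold keyA at *; split_ifs at * <;> simp_all

-- A's dedup loop computes dict.fromkeys of the truthy tags.
lemma dedup_loop_eq (tags : List String) (s : List String) :
    (tags.foldl
      (fun st t =>
        if t ≠ "" ∧ ¬ (PySem.Set.contains st.1 t = true) then (PySem.Set.add st.1 t, st.2 ++ [t])
        else st)
      (s, s)).2 = tags.foldl (fun acc t => if t ≠ "" then PySem.Set.add acc t else acc) s := by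
  induction tags generalizing s with
  | nil => rfl
  | cons t ts ih =>
    simp only [List.foldl_cons]
    by_cases h1 : t = ""
    · rw [if_neg (by simp [h1]), if_neg (by simp [h1])]; exact ih s
    · rw [if_pos h1]
      by_cases h2 : PySem.Set.contains s t = true
      · rw [if_neg (fun h => h.2 h2), show PySem.Set.add s t = s from by
          simp [PySem.Set.add, PySem.Set.contains] at h2 ⊢; exact h2]
        exact ih s
      · rw [if_pos ⟨h1, h2⟩, show PySem.Set.add s t = s ++ [t] from by
          simp only [PySem.Set.add, PySem.Set.contains] at h2 ⊢; rw [if_neg h2]]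
        exact ih (s ++ [t])

-- a single String key that orders exactly like the (Int, String) tuple key
def digChar (g : Int) : Char :=
  if g = 0 then '0' else if g = 1 then '1' else if g = 2 then '2' else if g = 3 then '3' else '4'

def keyS (t : String) : String := String.ofList (digChar (keyA t).1 :: (keyA t).2.toList)

lemma keyS_lt_iff (a b : String) :
    keyS a < keyS b ↔
      ((keyA a).1 < (keyA b).1 ∨ ((keyA a).1 = (keyA b).1 ∧ (keyA a).2 < (keyA b).2)) := by
  have h : keyS a < keyS b ↔
      (digChar (keyA a).1 < digChar (keyA b).1 ∨
        (digChar (keyA a).1 = digChar (keyA b).1 ∧ (keyA a).2 < (keyA b).2)) := by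
    rw [String.lt_iff_toList_lt]
    simp only [keyS, String.toList_ofList]
    rw [List.cons_lt_cons_iff, ← String.lt_iff_toList_lt]
  rw [h]
  rcases keyA1_mem a with ha | ha | ha | ha | ha <;>
    rcases keyA1_mem b with hb | hb | hb | hb | hb <;>
      rw [ha, hb] <;> simp [digChar]

lemma before_eq (a b : String) :
    (decide ((keyA a).1 < (keyA b).1) ||
      (!decide ((keyA b).1 < (keyA a).1) && decide ((keyA a).2 < (keyA b).2)))
      = decide (keyS a < keyS b) := by
  rw [Bool.eq_iff_iff]
  simp only [Bool.or_eq_true, Bool.and_eq_true, Bool.not_eq_true', decide_eq_true_eq,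
    decide_eq_false_iff_not, keyS_lt_iff]
  by_cases h3 : (keyA a).2 < (keyA b).2 <;> simp [h3] <;> omega

lemma sorted2_eq_sorted_keyS (xs : List String) :
    PySem.List.sorted2 xs (fun t => (keyA t).1) (fun t => (keyA t).2) =
      PySem.List.sorted xs keyS := by
  rw [PySem.List.sorted_eq_foldl_insertBy]
  unfold PySem.List.sorted2
  simp only [if_neg (by decide : ¬ (false = true))]
  congr 1
  funext acc x
  congr 1
  funext p q
  exact before_eq p q

-- B's buckets, named for the proofs
def Sb (g : Int) (u : List String) : List String :=
  PySem.List.sorted (u.filter (fun t => decide ((keyA t).1 = g))) (fun x => x)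

def SPb (u : List String) : List String :=
  ["AudioLDM2", "tango2"].filter (fun t => decide (t ∈ u))

lemma mem_Sb (g : Int) (u : List String) (x : String) :
    x ∈ Sb g u ↔ x ∈ u ∧ (keyA x).1 = g := by
  simp [Sb, PySem.List.mem_sorted, List.mem_filter]

lemma mem_SPb (u : List String) (x : String) :
    x ∈ SPb u ↔ (x = "AudioLDM2" ∨ x = "tango2") ∧ x ∈ u := by
  simp [SPb, List.mem_filter]

lemma pairwise_Sb (g : Int) (u : List String) (hg : g ≠ 4) (hu : u.Nodup) :
    (Sb g u).Pairwise (fun a b => keyS a < keyS b) := by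
  have hle : (Sb g u).Pairwise (fun a b : String => a ≤ b) :=
    PySem.List.sorted_pairwise _ _
  have hnd : (Sb g u).Nodup :=
    ((PySem.List.sorted_perm _ _ _).nodup_iff).mpr (hu.filter _)
  have hlt : (Sb g u).Pairwise (fun a b : String => a < b) :=
    (hle.and hnd).imp (fun h => lt_of_le_of_ne h.1 h.2)
  refine hlt.imp_of_mem ?_
  intro a b ha hb hab
  have hga := (mem_Sb g u a).mp ha
  have hgb := (mem_Sb g u b).mp hb
  rw [keyS_lt_iff]
  right
  refine ⟨by rw [hga.2, hgb.2], ?_⟩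
  rw [keyA2_eq_self a (by rw [hga.2]; exact hg), keyA2_eq_self b (by rw [hgb.2]; exact hg)]
  exact hab

lemma pairwise_SPb (u : List String) :
    (SPb u).Pairwise (fun a b => keyS a < keyS b) := by
  refine List.Pairwise.sublist List.filter_sublist ?_
  refine List.pairwise_cons.mpr ⟨?_, List.pairwise_singleton _ _⟩
  intro b hb
  rw [List.mem_singleton.mp hb, keyS_lt_iff]
  right
  refine ⟨by decide, ?_⟩
  rw [String.lt_iff_toList_lt]
  decide

lemma big_pairwise (u : List String) (hu : u.Nodup) :
    (Sb 0 u ++ Sb 1 u ++ Sb 2 u ++ Sb 3 u ++ SPb u).Pairwise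
      (fun a b => keyS a < keyS b) := by
  have cross : ∀ (g h : Int), g < h → ∀ a b : String,
      (keyA a).1 = g → (keyA b).1 = h → keyS a < keyS b := by
    intro g h hgh a b ha hb
    rw [keyS_lt_iff]; left; omega
  simp only [List.pairwise_append]
  refine ⟨⟨⟨⟨pairwise_Sb 0 u (by decide) hu, pairwise_Sb 1 u (by decide) hu, ?_⟩,
    pairwise_Sb 2 u (by decide) hu, ?_⟩, pairwise_Sb 3 u (by decide) hu, ?_⟩,
    pairwise_SPb u, ?_⟩
  · intro a ha b hb
    exact cross 0 1 (by decide) a b ((mem_Sb 0 u a).mp ha).2 ((mem_Sb 1 u b).mp hb).2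
  · intro a ha b hb
    rcases List.mem_append.mp ha with h | h
    · exact cross 0 2 (by decide) a b ((mem_Sb 0 u a).mp h).2 ((mem_Sb 2 u b).mp hb).2
    · exact cross 1 2 (by decide) a b ((mem_Sb 1 u a).mp h).2 ((mem_Sb 2 u b).mp hb).2
  · intro a ha b hb
    have hb3 := ((mem_Sb 3 u b).mp hb).2
    rcases List.mem_append.mp ha with h | h
    · rcases List.mem_append.mp h with h' | h'
      · exact cross 0 3 (by decide) a b ((mem_Sb 0 u a).mp h').2 hb3
      · exact cross 1 3 (by decide) a b ((mem_Sb 1 u a).mp h').2 hb3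
    · exact cross 2 3 (by decide) a b ((mem_Sb 2 u a).mp h).2 hb3
  · intro a ha b hb
    have hb4 : (keyA b).1 = 4 := by
      rcases ((mem_SPb u b).mp hb).1 with rfl | rfl <;> decide
    rcases List.mem_append.mp ha with h | h
    · rcases List.mem_append.mp h with h' | h'
      · rcases List.mem_append.mp h' with h'' | h''
        · exact cross 0 4 (by decide) a b ((mem_Sb 0 u a).mp h'').2 hb4
        · exact cross 1 4 (by decide) a b ((mem_Sb 1 u a).mp h'').2 hb4
      · exact cross 2 4 (by decide) a b ((mem_Sb 2 u a).mp h').2 hb4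
    · exact cross 3 4 (by decide) a b ((mem_Sb 3 u a).mp h).2 hb4

lemma big_perm (u : List String) (hu : u.Nodup) :
    (Sb 0 u ++ Sb 1 u ++ Sb 2 u ++ Sb 3 u ++ SPb u).Perm u := by
  have hnd : (Sb 0 u ++ Sb 1 u ++ Sb 2 u ++ Sb 3 u ++ SPb u).Nodup :=
    (big_pairwise u hu).imp (fun h => by rintro rfl; exact absurd h (lt_irrefl _))
  rw [List.perm_ext_iff_of_nodup hnd hu]
  intro x
  simp only [List.mem_append, mem_Sb, mem_SPb]
  constructor
  · rintro ((((⟨h, -⟩ | ⟨h, -⟩) | ⟨h, -⟩) | ⟨h, -⟩) | ⟨-, h⟩) <;> exact h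
  · intro hx
    rcases keyA1_mem x with h | h | h | h | h
    · exact Or.inl (Or.inl (Or.inl (Or.inl ⟨hx, h⟩)))
    · exact Or.inl (Or.inl (Or.inl (Or.inr ⟨hx, h⟩)))
    · exact Or.inl (Or.inl (Or.inr ⟨hx, h⟩))
    · exact Or.inl (Or.inr ⟨hx, h⟩)
    · refine Or.inr ⟨?_, hx⟩
      rcases (keyA1_four_iff x).mp h with h' | h'
      · exact Or.inr h'
      · exact Or.inl h'

lemma alt_eq (tags : List String) :
    ordered_experiment_tags_py_alt tags =
      Sb 0 (PySem.List.dedup (tags.filter (fun t => t ≠ ""))) ++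
      Sb 1 (PySem.List.dedup (tags.filter (fun t => t ≠ ""))) ++
      Sb 2 (PySem.List.dedup (tags.filter (fun t => t ≠ ""))) ++
      Sb 3 (PySem.List.dedup (tags.filter (fun t => t ≠ ""))) ++
      SPb (PySem.List.dedup (tags.filter (fun t => t ≠ ""))) := by
  have hg : ∀ g : Int, (fun t => decide (grpB t = g)) = (fun t => decide ((keyA t).1 = g)) := by
    intro g; funext t; rw [grpB_eq]
  unfold ordered_experiment_tags_py_alt
  simp only [List.foldl_cons, List.foldl_nil, List.nil_append, hg, Sb, SPb]

-- ===== VERDICT (by name: the statement is the Claim_ definition above) =====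
theorem ordered_experiment_tags_py_spec : Claim_equal_ordered_experiment_tags_py := by
  intro tags _
  unfold Spec_ordered_experiment_tags_py ordered_experiment_tags_py
  show PySem.List.sorted2
      ((tags.foldl (fun st t =>
          if t ≠ "" ∧ ¬ (PySem.Set.contains st.1 t = true) then (PySem.Set.add st.1 t, st.2 ++ [t])
          else st) (([] : List String), ([] : List String))).2)
      (fun t => (keyA t).1) (fun t => (keyA t).2) = _
  rw [dedup_loop_eq tags [], PySem.List.foldl_ite_eq_foldl_filter (fun t => t ≠ "") PySem.Set.add,
    ← PySem.Set.ofList_eq_foldl, ← PySem.List.dedup_eq_ofList, sorted2_eq_sorted_keyS, alt_eq]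
  have hu : (PySem.List.dedup (tags.filter (fun t => t ≠ ""))).Nodup :=
    PySem.List.nodup_dedup _
  exact PySem.List.sorted_eq_of_perm_of_pairwise_lt _ _ keyS (big_perm _ hu) (big_pairwise _ hu)
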